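-- pv_equiv track=rewrite | github.com/ilya-devel/diving_into_python | lesson3/tsk8.py | get_unique_items
-- ===== SOURCE A (Python) =====
-- def get_unique_items(d: dict):
--     tmp_dict = {key: d[key].copy() for key in d.keys()}
--     tmp_item = set()
--     for main in tmp_dict.keys():
--         for other in tmp_dict.keys():
--             if main == other:
--                 continue
--             for item in tmp_dict[main] & tmp_dict[other]:
--                 tmp_item.add(item)
--     for person in tmp_dict.keys():
--         for item in tmp_item:
--             tmp_dict[person].discard(item)
--     return tmp_dict
-- ===== SOURCE B (Python) =====
-- def get_unique_items(d: dict):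
--     # Each key keeps exactly the items that no OTHER key's set contains.
--     return {key: set(d[key]) - set().union(*(d[o] for o in d if o != key))
--             for key in d}
-- ===== Notes on version B (the rewrite author's own statement) =====
-- stated objective: simpler
-- what changed: Replaces A's three sequential loop nests (pairwise intersections accumulated into a shared set, then a global discard pass over every set) with a single dict comprehension computing d[key] minus the union of all other keys' sets.
import Mathlib
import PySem

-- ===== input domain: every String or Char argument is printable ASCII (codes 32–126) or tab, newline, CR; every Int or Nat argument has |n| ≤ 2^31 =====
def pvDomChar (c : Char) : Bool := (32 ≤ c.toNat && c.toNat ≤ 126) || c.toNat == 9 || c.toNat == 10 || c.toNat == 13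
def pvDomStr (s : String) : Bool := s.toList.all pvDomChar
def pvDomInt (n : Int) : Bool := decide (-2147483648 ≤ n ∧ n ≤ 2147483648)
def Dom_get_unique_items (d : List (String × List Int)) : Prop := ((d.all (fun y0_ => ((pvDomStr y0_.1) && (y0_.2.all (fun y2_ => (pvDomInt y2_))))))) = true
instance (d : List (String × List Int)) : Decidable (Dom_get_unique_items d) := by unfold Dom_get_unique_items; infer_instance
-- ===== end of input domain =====

-- B replaces A's pairwise-intersection accumulation plus global discard pass by a per-key
-- set-difference against the union of the other keys' sets (objective: simpler).

-- ===== PORT A =====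
-- shared input decoding: the association list stands for the Python dict of sets
-- (last value wins for a repeated key, sets hold first occurrences)
def pvToDict (d : List (String × List Int)) : PySem.Dict String (PySem.Set Int) :=
  d.foldl (fun acc kv => acc.insert kv.1 (PySem.Set.ofList kv.2)) PySem.Dict.empty

def get_unique_items (d : List (String × List Int)) : List (String × List Int) :=
  let tmp_dict := pvToDict d
  let ks := tmp_dict.keys
  -- tmp_item: every item of some pairwise intersection, added one by one
  let tmp_item : PySem.Set Int :=
    ks.foldl (fun s main =>
      ks.foldl (fun s other =>
        if main == other then s
        else (PySem.Set.inter (tmp_dict.getD main []) (tmp_dict.getD other [])).foldl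
               PySem.Set.add s) s)
      PySem.Set.empty
  -- discard every tmp_item element from every person's set (in place in Python)
  tmp_dict.items.map (fun kv => (kv.1, tmp_item.foldl PySem.Set.discard kv.2))

-- ===== PORT B =====
def get_unique_items_alt (d : List (String × List Int)) : List (String × List Int) :=
  let dd := pvToDict d
  dd.items.map (fun kv =>
    (kv.1, PySem.Set.diff kv.2
      (dd.keys.foldl
        (fun u o => if o == kv.1 then u else PySem.Set.union u (dd.getD o []))
        PySem.Set.empty)))

-- ===== PRECONDITION & SPEC =====
def Spec_get_unique_items (d : List (String × List Int)) (out : List (String × List Int)) : Prop := out = get_unique_items_alt d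
instance (d : List (String × List Int)) (out : List (String × List Int)) : Decidable (Spec_get_unique_items d out) := by unfold Spec_get_unique_items; infer_instance

-- ===== CLAIM (what is proved, stated in full; the proofs are below) =====
def Claim_equal_get_unique_items : Prop := ∀ (d : List (String × List Int)), Dom_get_unique_items d → Spec_get_unique_items d (get_unique_items d)

-- ===== LEMMAS AND PROOFS =====

-- a fold whose step only ever adds elements satisfying P: membership characterisation
theorem mem_foldl_of_mem_step {α β : Type} [BEq β] (g : PySem.Set β → α → PySem.Set β)
    (P : α → β → Prop) (h : ∀ s a x, x ∈ g s a ↔ x ∈ s ∨ P a x) :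
    ∀ (l : List α) (s : PySem.Set β) (x : β),
      x ∈ l.foldl g s ↔ x ∈ s ∨ ∃ a ∈ l, P a x := by
  intro l
  induction l with
  | nil => intro s x; simp
  | cons a l ih =>
    intro s x
    simp only [List.foldl_cons, ih, h, List.mem_cons]
    constructor
    · rintro ((hs | hp) | ⟨b, hb, hp⟩)
      · exact Or.inl hs
      · exact Or.inr ⟨a, Or.inl rfl, hp⟩
      · exact Or.inr ⟨b, Or.inr hb, hp⟩
    · rintro (hs | ⟨b, (rfl | hb), hp⟩)
      · exact Or.inl (Or.inl hs)
      · exact Or.inl (Or.inr hp)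
      · exact Or.inr ⟨b, hb, hp⟩

-- folding Set.add over a list unions its elements in
theorem mem_foldl_add_id {beta : Type} [BEq beta] [LawfulBEq beta] :
    ∀ (l : List beta) (s : PySem.Set beta) (y : beta),
      y ∈ l.foldl PySem.Set.add s ↔ y ∈ s ∨ y ∈ l := by
  intro l
  induction l with
  | nil => intro s y; simp
  | cons a l ih =>
    intro s y
    simp only [List.foldl_cons, ih, PySem.Set.mem_add, List.mem_cons]
    tauto

-- folding discard over a list filters the set
theorem foldl_discard_eq_filter {β : Type} [BEq β] [LawfulBEq β] :
    ∀ (l : List β) (s : PySem.Set β),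
      l.foldl PySem.Set.discard s = s.filter (fun x => !l.contains x) := by
  intro l
  induction l with
  | nil => intro s; simp
  | cons a l ih =>
    intro s
    simp only [List.foldl_cons, ih, PySem.Set.discard, List.filter_filter]
    apply List.filter_congr
    intro x _
    simp only [List.contains_cons, Bool.not_or, Bool.and_comm]

-- ===== VERDICT (by name: the statement is the Claim_ definition above) =====
theorem get_unique_items_spec : Claim_equal_get_unique_items := by
  intro d _
  unfold Spec_get_unique_items get_unique_items get_unique_items_alt
  apply List.map_congr_left
  intro kv hkv
  have hnd : (pvToDict d).keys.Nodup := by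
    unfold pvToDict
    exact PySem.Dict.nodup_keys_foldl_insert_key _ _ _ _ PySem.Dict.nodup_keys_empty
  have hkmem : kv.1 ∈ (pvToDict d).keys := PySem.Dict.mem_keys_of_mem_items _ hkv
  have hget : (pvToDict d).getD kv.1 [] = kv.2 := by
    have := PySem.Dict.getD_of_mem_items (d0 := ([] : PySem.Set Int)) (pvToDict d)
      (by simpa using hkv) hnd
    simpa using this
  refine Prod.ext rfl ?_
  rw [foldl_discard_eq_filter]
  simp only [PySem.Set.diff]
  apply List.filter_congr
  intro x hx
  -- x ∈ kv.2, show the two "excluded" predicates agree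
  have hxk : x ∈ (pvToDict d).getD kv.1 [] := hget ▸ hx
  -- membership in tmp_item
  have hT : ∀ y, y ∈ (pvToDict d).keys.foldl (fun s main =>
        (pvToDict d).keys.foldl (fun s other =>
          if main == other then s
          else (PySem.Set.inter ((pvToDict d).getD main []) ((pvToDict d).getD other [])).foldl
                 PySem.Set.add s) s) PySem.Set.empty
      ↔ ∃ m ∈ (pvToDict d).keys, ∃ o ∈ (pvToDict d).keys, m ≠ o ∧
          y ∈ (pvToDict d).getD m [] ∧ y ∈ (pvToDict d).getD o [] := by
    intro y
    rw [mem_foldl_of_mem_step _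
      (fun main y => ∃ o ∈ (pvToDict d).keys, main ≠ o ∧
        y ∈ (pvToDict d).getD main [] ∧ y ∈ (pvToDict d).getD o [])
      (fun s main z => by
        rw [mem_foldl_of_mem_step _
          (fun other z => main ≠ other ∧
            z ∈ (pvToDict d).getD main [] ∧ z ∈ (pvToDict d).getD other [])
          (fun s other z => by
            rcases eq_or_ne main other with rfl | hne
            · simp
            · have hb : (main == other) = false := beq_eq_false_iff_ne.mpr hne
              simp only [hb, Bool.false_eq_true, if_false]
              rw [mem_foldl_add_id]
              simp [PySem.Set.mem_inter, hne])])]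
    simp
  have hU : ∀ y, y ∈ (pvToDict d).keys.foldl
        (fun u o => if o == kv.1 then u else PySem.Set.union u ((pvToDict d).getD o []))
        PySem.Set.empty
      ↔ ∃ o ∈ (pvToDict d).keys, o ≠ kv.1 ∧ y ∈ (pvToDict d).getD o [] := by
    intro y
    rw [mem_foldl_of_mem_step _
      (fun o y => o ≠ kv.1 ∧ y ∈ (pvToDict d).getD o [])
      (fun s o z => by
        rcases eq_or_ne o kv.1 with rfl | hne
        · simp
        · simp [hne, PySem.Set.mem_union])]
    simp
  have hiff : (x ∈ (pvToDict d).keys.foldl (fun s main =>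
        (pvToDict d).keys.foldl (fun s other =>
          if main == other then s
          else (PySem.Set.inter ((pvToDict d).getD main []) ((pvToDict d).getD other [])).foldl
                 PySem.Set.add s) s) PySem.Set.empty)
      ↔ (x ∈ (pvToDict d).keys.foldl
        (fun u o => if o == kv.1 then u else PySem.Set.union u ((pvToDict d).getD o []))
        PySem.Set.empty) := by
    rw [hT, hU]
    constructor
    · rintro ⟨m, hm, o, ho, hmo, hxm, hxo⟩
      rcases eq_or_ne m kv.1 with rfl | hmk
      · exact ⟨o, ho, Ne.symm hmo, hxo⟩
      · exact ⟨m, hm, hmk, hxm⟩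
    · rintro ⟨o, ho, hok, hxo⟩
      exact ⟨kv.1, hkmem, o, ho, Ne.symm hok, hxk, hxo⟩
  simp only [Bool.not_eq_eq_eq_not, Bool.not_not]
  rw [Bool.eq_iff_iff]
  simpa using hiff
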